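-- pv_equiv track=rewrite | github.com/xenotropic/wikipediatts | preprocessor.py | get_middle_comma
-- ===== SOURCE A (Python) =====
-- def get_middle_comma (sentence):
--     if len (sentence) ==0: return 0
--     comma_indices = [i for i, char in enumerate(sentence) if char == ',']
--     space_indices = [i for i, char in enumerate(sentence) if char == ' ']
--
--     middle_index = len(sentence) // 2
--     nearest_comma_index = None
--
--     # Find the nearest comma that is not in the middle of a number
--     for index in comma_indices:
--         if not (index == 0 ) and not (index > ( len (sentence) - 2 )):
--             if not sentence[index-1].isdigit() and not sentence[index+1].isdigit():
--                 if nearest_comma_index is None or abs(index - middle_index) < abs(nearest_comma_index - middle_index):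
--                     nearest_comma_index = index
--
--     # If no valid comma is found, find the nearest space
--     if nearest_comma_index is None:
--         nearest_space_index = min(space_indices, key=lambda x: abs(x - middle_index))
--         return nearest_space_index
--
--     return nearest_comma_index
-- ===== SOURCE B (Python) =====
-- def get_middle_comma(sentence):
--     n = len(sentence)
--     if n == 0:
--         return 0
--     mid = n // 2
--     space_index = None
--     for d in range(n + 1):
--         for idx in ((mid,) if d == 0 else (mid - d, mid + d)):
--             if 0 <= idx < n:
--                 ch = sentence[idx]
--                 if (ch == ',' and idx != 0 and idx != n - 1
--                         and not sentence[idx - 1].isdigit()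
--                         and not sentence[idx + 1].isdigit()):
--                     return idx
--                 if ch == ' ' and space_index is None:
--                     space_index = idx
--     if space_index is None:
--         raise ValueError("no valid comma and no space in sentence")
--     return space_index
-- ===== Notes on version B (the rewrite author's own statement) =====
-- stated objective: alternative
-- what changed: Instead of A's building comma-index and space-index lists and running separate min-by-distance passes, B scans outward from the middle index (left position before right at each distance), returns the first valid comma it meets and otherwise the first space it saw.
import Mathlib
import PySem

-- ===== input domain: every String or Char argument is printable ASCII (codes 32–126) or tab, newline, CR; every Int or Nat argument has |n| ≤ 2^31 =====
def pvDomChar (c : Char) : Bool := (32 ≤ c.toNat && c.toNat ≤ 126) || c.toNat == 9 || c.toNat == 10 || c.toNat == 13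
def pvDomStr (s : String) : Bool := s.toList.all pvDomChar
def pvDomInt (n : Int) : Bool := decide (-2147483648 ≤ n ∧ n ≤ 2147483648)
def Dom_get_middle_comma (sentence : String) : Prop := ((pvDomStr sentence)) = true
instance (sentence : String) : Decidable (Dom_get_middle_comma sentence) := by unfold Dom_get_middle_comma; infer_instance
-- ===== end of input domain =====

-- B replaces A's two index-list passes plus separate min scans by a single outward scan
-- from the middle index that stops at the first valid comma (objective: alternative decomposition).

-- shared helper: sentence[i].isdigit() for an index the guards keep in range
-- (exact there: pyGet? returns some of the character; the `false` branch is unreachable under the guards)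
def gmcDigAt (cs : List Char) (i : Int) : Bool :=
  match PySem.List.pyGet? cs i with
  | some c => PySem.Chars.isdigit c
  | none => false

-- ===== PORT A =====
def get_middle_comma (sentence : String) : Int :=
  let cs := sentence.toList
  if cs.length == 0 then 0
  else
    let comma_indices := ((PySem.List.enumerate cs 0).filter (fun p => p.2 == ',')).map (·.1)
    let space_indices := ((PySem.List.enumerate cs 0).filter (fun p => p.2 == ' ')).map (·.1)
    let middle_index := PySem.Int.floordiv (cs.length : Int) 2
    let nearest := comma_indices.foldl (fun acc index =>
      if !(index == 0) && !(index > (cs.length : Int) - 2) then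
        if !(gmcDigAt cs (index - 1)) && !(gmcDigAt cs (index + 1)) then
          match acc with
          | none => some index
          | some j => if (index - middle_index).natAbs < (j - middle_index).natAbs then some index else acc
        else acc
      else acc) (none : Option Int)
    match nearest with
    | some j => j
    | none =>
      -- Python's min(space_indices, key=…) raises ValueError on the empty list; Pre_ excludes that, 0 is a placeholder
      match PySem.List.min? space_indices (fun x => (x - middle_index).natAbs) with
      | some s => s
      | none => 0

-- ===== PORT B =====
-- one probe of Source B's inner loop body at position idx: .inl = the early `return idx`,
-- .inr = the (possibly updated) remembered nearest-space index
def gmcStep (cs : List Char) (idx : Int) (space : Option Int) : Sum Int (Option Int) :=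
  if 0 ≤ idx ∧ idx < (cs.length : Int) then
    match PySem.List.pyGet? cs idx with
    | some ch =>
      if ch == ',' && !(idx == 0) && !(idx == (cs.length : Int) - 1)
          && !(gmcDigAt cs (idx - 1)) && !(gmcDigAt cs (idx + 1)) then .inl idx
      else if ch == ' ' && space.isNone then .inr (some idx)
      else .inr space
    | none => .inr space   -- unreachable: idx is in range
  else .inr space

-- Source B's `for d in range(n+1)` loop, structurally recursive on the remaining fuel
def gmcScan (cs : List Char) (mid : Int) : Nat → Nat → Option Int → Int
  | 0, _, space => space.getD 0   -- Source B raises ValueError when space is still None; Pre_ excludes that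
  | fuel + 1, d, space =>
    match gmcStep cs (mid - (d : Int)) space with
    | .inl r => r
    | .inr sp =>
      if d = 0 then gmcScan cs mid fuel (d + 1) sp
      else
        match gmcStep cs (mid + (d : Int)) sp with
        | .inl r => r
        | .inr sp2 => gmcScan cs mid fuel (d + 1) sp2

def get_middle_comma_alt (sentence : String) : Int :=
  let cs := sentence.toList
  if cs.length == 0 then 0
  else gmcScan cs (PySem.Int.floordiv (cs.length : Int) 2) (cs.length + 1) 0 none

-- ===== PRECONDITION & SPEC =====
-- index i of cs holds a comma that A's loop accepts
def gmcIsValidComma (cs : List Char) (i : Int) : Bool :=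
  decide (0 ≤ i) && decide (i < (cs.length : Int)) && (PySem.List.pyGet? cs i == some ',')
    && !(i == 0) && !(i == (cs.length : Int) - 1)
    && !(gmcDigAt cs (i - 1)) && !(gmcDigAt cs (i + 1))

-- Pre_ excludes exactly the inputs on which Python A raises ValueError (min of an empty
-- sequence): a non-empty sentence with no space and no comma that passes A's filter.
def Pre_get_middle_comma (sentence : String) : Prop :=
  sentence.toList = [] ∨ ' ' ∈ sentence.toList ∨
    (PySem.List.pyRange 0 (sentence.toList.length : Int) 1).any (gmcIsValidComma sentence.toList) = true
instance (sentence : String) : Decidable (Pre_get_middle_comma sentence) := by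
  unfold Pre_get_middle_comma; infer_instance

def pvWitness_get_middle_comma : String := "hello, world"

def Spec_get_middle_comma (sentence : String) (out : Int) : Prop := out = get_middle_comma_alt sentence
instance (sentence : String) (out : Int) : Decidable (Spec_get_middle_comma sentence out) := by
  unfold Spec_get_middle_comma; infer_instance

-- ===== CLAIM (what is proved, stated in full; the proofs are below) =====
def Claim_equal_get_middle_comma : Prop := ∀ (sentence : String), Dom_get_middle_comma sentence → Pre_get_middle_comma sentence → Spec_get_middle_comma sentence (get_middle_comma sentence)

-- ===== LEMMAS AND PROOFS =====

-- index i of cs holds a space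
def gmcIsSpace (cs : List Char) (i : Int) : Bool :=
  decide (0 ≤ i) && decide (i < (cs.length : Int)) && (PySem.List.pyGet? cs i == some ' ')


-- left-biased minimum of two optional candidates (the tie keeps the LEFT argument)
def gmcMerge (key : Int → Nat) : Option Int → Option Int → Option Int
  | none, o => o
  | some a, none => some a
  | some a, some b => if key b < key a then some b else some a

-- first minimizer of key in a list (reference form of Python's min(…, key=…) loop)
def gmcMinF (key : Int → Nat) : List Int → Option Int
  | [] => none
  | x :: t => gmcMerge key (some x) (gmcMinF key t)

-- the order in which B's scan visits positions, from distance d on, for fuel more rounds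
def gmcOrder (mid : Int) : Nat → Nat → List Int
  | 0, _ => []
  | fuel + 1, d => (if d = 0 then [mid] else [mid - (d : Int), mid + (d : Int)]) ++ gmcOrder mid fuel (d + 1)

-- "a strictly precedes b in B's scan order": nearer to mid, or equally near and to the left
def gmcQ (mid a b : Int) : Prop := (a - mid).natAbs < (b - mid).natAbs ∨ ((a - mid).natAbs = (b - mid).natAbs ∧ a < b)

lemma gmcMerge_assoc (key : Int → Nat) (o1 o2 o3 : Option Int) :
    gmcMerge key (gmcMerge key o1 o2) o3 = gmcMerge key o1 (gmcMerge key o2 o3) := by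
  rcases o1 with _ | a <;> rcases o2 with _ | b <;> rcases o3 with _ | c <;>
    simp [gmcMerge] <;> split_ifs <;> simp [gmcMerge] <;> split_ifs <;> first | rfl | omega

lemma gmcFoldl_eq_minF (key : Int → Nat) (l : List Int) (acc : Option Int) :
    l.foldl (fun acc x => match acc with
      | none => some x
      | some m => if key x < key m then some x else some m) acc
      = gmcMerge key acc (gmcMinF key l) := by
  induction l generalizing acc with
  | nil => cases acc <;> simp [gmcMinF, gmcMerge]
  | cons x t ih =>
    have hstep : (fun (acc : Option Int) (x : Int) => match acc with
      | none => some x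
      | some m => if key x < key m then some x else some m)
        = fun acc x => gmcMerge key acc (some x) := by
      funext a y; cases a <;> rfl
    rw [List.foldl_cons, ih]
    rw [show (match acc with
      | none => some x
      | some m => if key x < key m then some x else some m) = gmcMerge key acc (some x) by cases acc <;> rfl]
    rw [gmcMerge_assoc]
    rfl

lemma gmcMinF_eq_none (key : Int → Nat) (l : List Int) : gmcMinF key l = none ↔ l = [] := by
  cases l with
  | nil => simp [gmcMinF]
  | cons x t =>
    simp only [gmcMinF]
    cases gmcMinF key t <;> simp [gmcMerge] <;> split_ifs <;> simp

lemma gmcMinF_best (key : Int → Nat) : ∀ (l : List Int), l.Pairwise (· < ·) → ∀ (m : Int),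
    gmcMinF key l = some m →
    m ∈ l ∧ ∀ i ∈ l, key m < key i ∨ (key m = key i ∧ m ≤ i) := by
  intro l
  induction l with
  | nil => intro _ m h; simp [gmcMinF] at h
  | cons x t ih =>
    intro hl m h
    rcases List.pairwise_cons.mp hl with ⟨hx, ht⟩
    simp only [gmcMinF] at h
    cases hmt : gmcMinF key t with
    | none =>
      rw [hmt] at h
      simp [gmcMerge] at h
      subst h
      have ht0 : t = [] := (gmcMinF_eq_none key t).mp hmt
      subst ht0
      simp
    | some j =>
      rw [hmt] at h
      rcases ih ht j hmt with ⟨hjmem, hjbest⟩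
      simp only [gmcMerge] at h
      split_ifs at h with hkey
      · cases h
        refine ⟨List.mem_cons_of_mem _ hjmem, ?_⟩
        intro i hi
        rcases List.mem_cons.mp hi with rfl | hi'
        · left; exact hkey
        · exact hjbest i hi'
      · cases h
        refine ⟨List.mem_cons_self, ?_⟩
        intro i hi
        rcases List.mem_cons.mp hi with rfl | hi'
        · right; exact ⟨rfl, le_refl _⟩
        · rcases hjbest i hi' with h1 | ⟨h1, h2⟩
          · left; omega
          · by_cases hxi : key x < key i
            · left; exact hxi
            · right
              constructor
              · omega
              · exact le_of_lt (hx i hi')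

lemma gmcFind?_best (p : Int → Bool) (mid : Int) (l : List Int)
    (hl : l.Pairwise (gmcQ mid)) (m : Int) (h : l.find? p = some m) :
    p m = true ∧ ∀ i ∈ l, p i = true → (m = i ∨ gmcQ mid m i) := by
  induction l with
  | nil => simp at h
  | cons x t ih =>
    rcases List.pairwise_cons.mp hl with ⟨hx, ht⟩
    by_cases hpx : p x = true
    · rw [List.find?_cons_of_pos hpx] at h
      cases h
      refine ⟨hpx, ?_⟩
      intro i hi _
      rcases List.mem_cons.mp hi with rfl | hi'
      · left; rfl
      · right; exact hx i hi'
    · rw [List.find?_cons_of_neg hpx] at h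
      rcases ih ht h with ⟨hpm, hbest⟩
      refine ⟨hpm, ?_⟩
      intro i hi hpi
      rcases List.mem_cons.mp hi with rfl | hi'
      · exact absurd hpi hpx
      · exact hbest i hi' hpi

lemma gmcOrder_key_lb (mid : Int) : ∀ (fuel d : Nat) (x : Int),
    x ∈ gmcOrder mid fuel d → d ≤ (x - mid).natAbs := by
  intro fuel
  induction fuel with
  | zero => intro d x hx; simp [gmcOrder] at hx
  | succ fuel ih =>
    intro d x hx
    simp only [gmcOrder, List.mem_append] at hx
    rcases hx with hx | hx
    · split_ifs at hx with hd
      · subst hd; simp at hx; omega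
      · simp at hx; rcases hx with rfl | rfl <;> omega
    · have := ih (d + 1) x hx; omega

lemma gmcOrder_pairwise (mid : Int) : ∀ (fuel d : Nat),
    (gmcOrder mid fuel d).Pairwise (gmcQ mid) := by
  intro fuel
  induction fuel with
  | zero => intro d; simp [gmcOrder]
  | succ fuel ih =>
    intro d
    simp only [gmcOrder]
    rw [List.pairwise_append]
    refine ⟨?_, ih (d + 1), ?_⟩
    · split_ifs with hd
      · simp
      · simp [gmcQ]
        omega
    · intro a ha b hb
      have hb' := gmcOrder_key_lb mid fuel (d + 1) b hb
      have ha' : (a - mid).natAbs = d := by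
        split_ifs at ha with hd
        · subst hd; simp at ha; omega
        · simp at ha; rcases ha with rfl | rfl <;> omega
      left; omega

lemma gmcOrder_mem (mid : Int) : ∀ (fuel d0 d : Nat), d0 ≤ d → d < d0 + fuel →
    (mid - (d : Int)) ∈ gmcOrder mid fuel d0 ∧ (mid + (d : Int)) ∈ gmcOrder mid fuel d0 := by
  intro fuel
  induction fuel with
  | zero => intro d0 d h1 h2; omega
  | succ fuel ih =>
    intro d0 d h1 h2
    simp only [gmcOrder, List.mem_append]
    by_cases hd : d = d0
    · subst hd
      constructor <;> left <;> split_ifs with h0 <;> simp <;> omega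
    · have := ih (d0 + 1) d (by omega) (by omega)
      exact ⟨Or.inr this.1, Or.inr this.2⟩

lemma gmcStep_eq (cs : List Char) (idx : Int) (space : Option Int) :
    gmcStep cs idx space =
      if gmcIsValidComma cs idx then .inl idx
      else .inr (if gmcIsSpace cs idx && space.isNone then some idx else space) := by
  by_cases hr : 0 ≤ idx ∧ idx < (cs.length : Int)
  · have h1 : (decide (0 ≤ idx)) = true := decide_eq_true hr.1
    have h2 : (decide (idx < (cs.length : Int))) = true := decide_eq_true hr.2
    unfold gmcStep gmcIsValidComma gmcIsSpace
    rw [if_pos hr, PySem.List.pyGet?_eq_some_getElem cs hr.1 hr.2]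
    simp only [h1, h2, Bool.true_and]
    by_cases hc : cs[idx.toNat] = ','
    · simp [hc]
    · have hc' : (cs[idx.toNat] == ',') = false := by simp [hc]
      have hc'' : ((some cs[idx.toNat] : Option Char) == some ',') = false := by simp [hc]
      simp only [hc', hc'', Bool.false_and, if_neg Bool.false_ne_true]
      by_cases hs : cs[idx.toNat] = ' '
      · cases space <;> simp [hs]
      · have hs' : (cs[idx.toNat] == ' ') = false := by simp [hs]
        have hs'' : ((some cs[idx.toNat] : Option Char) == some ' ') = false := by simp [hs]
        simp [hs', hs'']
  · have hA : gmcIsValidComma cs idx = false := by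
      unfold gmcIsValidComma
      rcases not_and_or.mp hr with h | h <;> simp [h]
    have hB : gmcIsSpace cs idx = false := by
      unfold gmcIsSpace
      rcases not_and_or.mp hr with h | h <;> simp [h]
    unfold gmcStep
    rw [if_neg hr]
    simp [hA, hB]

lemma gmcScan_spec (cs : List Char) (mid : Int) : ∀ (fuel d : Nat) (space : Option Int),
    gmcScan cs mid fuel d space =
      match (gmcOrder mid fuel d).find? (gmcIsValidComma cs) with
      | some j => j
      | none =>
        match space with
        | some s => s
        | none => ((gmcOrder mid fuel d).find? (gmcIsSpace cs)).getD 0 := by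
  intro fuel
  induction fuel with
  | zero =>
    intro d space
    simp only [gmcScan, gmcOrder, List.find?_nil]
    cases space <;> rfl
  | succ fuel ih =>
    intro d space
    simp only [gmcScan, gmcStep_eq, gmcOrder]
    by_cases hd : d = 0
    · subst hd
      simp only [reduceIte, Nat.cast_zero, sub_zero, add_zero, Nat.zero_add,
        List.singleton_append, ih]
      by_cases hc : gmcIsValidComma cs mid = true
      · simp [hc, List.find?_cons_of_pos hc]
      · have hc' : gmcIsValidComma cs mid = false := by simpa using hc
        simp only [hc', Bool.false_eq_true, if_false, List.find?_cons_of_neg hc]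
        cases hf : (gmcOrder mid fuel 1).find? (gmcIsValidComma cs) with
        | some j => simp
        | none =>
          cases space with
          | some s => simp
          | none =>
            by_cases hs : gmcIsSpace cs mid = true
            · simp [hs, List.find?_cons_of_pos hs]
            · have hs' : gmcIsSpace cs mid = false := by simpa using hs
              simp [hs', List.find?_cons_of_neg hs]
    · simp only [hd, if_false, reduceIte, List.cons_append, List.nil_append, ih]
      by_cases hc1 : gmcIsValidComma cs (mid - (d : Int)) = true
      · simp [hc1, List.find?_cons_of_pos hc1]
      · have hc1' : gmcIsValidComma cs (mid - (d : Int)) = false := by simpa using hc1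
        simp only [hc1', Bool.false_eq_true, if_false, List.find?_cons_of_neg hc1]
        by_cases hc2 : gmcIsValidComma cs (mid + (d : Int)) = true
        · simp [hc2, List.find?_cons_of_pos hc2]
        · have hc2' : gmcIsValidComma cs (mid + (d : Int)) = false := by simpa using hc2
          simp only [hc2', Bool.false_eq_true, if_false, List.find?_cons_of_neg hc2]
          cases hf : (gmcOrder mid fuel (d + 1)).find? (gmcIsValidComma cs) with
          | some j => simp
          | none =>
            cases space with
            | some s => simp
            | none =>
              by_cases hs1 : gmcIsSpace cs (mid - (d : Int)) = true
              · simp [hs1, List.find?_cons_of_pos hs1]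
              · have hs1' : gmcIsSpace cs (mid - (d : Int)) = false := by simpa using hs1
                simp only [hs1', Bool.false_and, if_neg Bool.false_ne_true,
                  List.find?_cons_of_neg hs1]
                by_cases hs2 : gmcIsSpace cs (mid + (d : Int)) = true
                · simp [hs2, List.find?_cons_of_pos hs2]
                · have hs2' : gmcIsSpace cs (mid + (d : Int)) = false := by simpa using hs2
                  simp [hs2', List.find?_cons_of_neg hs2]

lemma gmcMin?_fold (key : Int → Nat) : ∀ (l : List Int) (acc : Option Int),
    List.foldl (fun acc x => gmcMerge key acc (some x)) acc l = gmcMerge key acc (gmcMinF key l) := by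
  intro l
  induction l with
  | nil => intro acc; cases acc <;> rfl
  | cons x t ih =>
    intro acc
    rw [List.foldl_cons, ih, gmcMerge_assoc]
    rfl

lemma gmcMin?_eq (key : Int → Nat) (l : List Int) : PySem.List.min? l key = gmcMinF key l := by
  unfold PySem.List.min?
  refine Eq.trans (List.foldl_ext _ (fun acc x => gmcMerge key acc (some x)) none ?_) ?_
  · intro a b _
    cases a <;> rfl
  · rw [gmcMin?_fold]
    cases gmcMinF key l <;> rfl

lemma gmcIndices_eq (cs : List Char) (c : Char) :
    ((PySem.List.enumerate cs 0).filter (fun p => p.2 == c)).map (·.1)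
      = (PySem.List.pyRange 0 (cs.length : Int) 1).filter
          (fun j => PySem.List.pyGetD cs j ' ' == c) := by
  rw [show (PySem.List.enumerate cs 0) = PySem.List.enumerate cs from rfl]
  rw [PySem.List.enumerate_eq_map_pyRange cs ' ']
  rw [List.filter_map, List.map_map]
  simp [Function.comp_def, PySem.List.len]

lemma gmcFoldA_eq (cs : List Char) (mid : Int) (l : List Int) :
    l.foldl (fun acc index =>
      if !(index == 0) && !(index > (cs.length : Int) - 2) then
        if !(gmcDigAt cs (index - 1)) && !(gmcDigAt cs (index + 1)) then
          match acc with
          | none => some index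
          | some j => if (index - mid).natAbs < (j - mid).natAbs then some index else acc
        else acc
      else acc) none
    = gmcMinF (fun x => (x - mid).natAbs)
        (l.filter (fun index => (!(index == 0) && !(index > (cs.length : Int) - 2))
          && (!(gmcDigAt cs (index - 1)) && !(gmcDigAt cs (index + 1))))) := by
  rw [show gmcMinF (fun x => (x - mid).natAbs)
        (l.filter (fun index => (!(index == 0) && !(index > (cs.length : Int) - 2))
          && (!(gmcDigAt cs (index - 1)) && !(gmcDigAt cs (index + 1)))))
      = (l.filter (fun index => (!(index == 0) && !(index > (cs.length : Int) - 2))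
          && (!(gmcDigAt cs (index - 1)) && !(gmcDigAt cs (index + 1))))).foldl
          (fun acc x => match acc with
            | none => some x
            | some m => if (x - mid).natAbs < (m - mid).natAbs then some x else some m) none
      from by rw [gmcFoldl_eq_minF]; rfl]
  rw [List.foldl_filter]
  congr 1
  funext acc index
  by_cases h1 : (!(index == 0) && !(index > (cs.length : Int) - 2)) = true
  · by_cases h2 : (!(gmcDigAt cs (index - 1)) && !(gmcDigAt cs (index + 1))) = true
    · simp only [h1, h2, Bool.true_and, if_true, reduceIte]
      cases acc <;> rfl
    · have h2' : (!(gmcDigAt cs (index - 1)) && !(gmcDigAt cs (index + 1))) = false := by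
        simpa using h2
      simp [h1, h2']
  · have h1' : (!(index == 0) && !(index > (cs.length : Int) - 2)) = false := by simpa using h1
    simp [h1']

lemma gmcFilterComma_eq (cs : List Char) :
    ((PySem.List.pyRange 0 (cs.length : Int) 1).filter
        (fun j => PySem.List.pyGetD cs j ' ' == ',')).filter
      (fun index => (!(index == 0) && !(index > (cs.length : Int) - 2))
        && (!(gmcDigAt cs (index - 1)) && !(gmcDigAt cs (index + 1))))
    = (PySem.List.pyRange 0 (cs.length : Int) 1).filter (gmcIsValidComma cs) := by
  rw [List.filter_filter]
  apply List.filter_congr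
  intro j hj
  rcases PySem.List.mem_pyRange_one.mp hj with ⟨h0, h1⟩
  unfold gmcIsValidComma
  rw [PySem.List.pyGet?_eq_some_getElem cs h0 h1, PySem.List.pyGetD_eq_getElem cs ' ' h0 h1]
  have e1 : (decide (0 ≤ j)) = true := decide_eq_true h0
  have e2 : (decide (j < (cs.length : Int))) = true := decide_eq_true h1
  have e3 : ((cs.length : Int) - 2 < j) ↔ (j = (cs.length : Int) - 1) := by omega
  simp only [e1, e2, Bool.true_and]
  rw [Bool.eq_iff_iff]
  simp only [Bool.and_eq_true, Bool.not_eq_eq_eq_not, Bool.not_true, decide_eq_false_iff_not,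
    beq_iff_eq, Option.some.injEq, Bool.not_eq_true', beq_eq_false_iff_ne, ne_eq,
    decide_eq_true_eq, gt_iff_lt, e3]
  tauto

lemma gmcFilterSpace_eq (cs : List Char) :
    (PySem.List.pyRange 0 (cs.length : Int) 1).filter (fun j => PySem.List.pyGetD cs j ' ' == ' ')
    = (PySem.List.pyRange 0 (cs.length : Int) 1).filter (gmcIsSpace cs) := by
  apply List.filter_congr
  intro j hj
  rcases PySem.List.mem_pyRange_one.mp hj with ⟨h0, h1⟩
  unfold gmcIsSpace
  rw [PySem.List.pyGet?_eq_some_getElem cs h0 h1, PySem.List.pyGetD_eq_getElem cs ' ' h0 h1]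
  have e1 : (decide (0 ≤ j)) = true := decide_eq_true h0
  have e2 : (decide (j < (cs.length : Int))) = true := decide_eq_true h1
  simp [e1, e2]

lemma gmcValid_bounds (cs : List Char) (j : Int) (h : gmcIsValidComma cs j = true) :
    0 ≤ j ∧ j < (cs.length : Int) := by
  unfold gmcIsValidComma at h
  simp only [Bool.and_eq_true, decide_eq_true_eq] at h
  exact ⟨h.1.1.1.1.1.1, h.1.1.1.1.1.2⟩

lemma gmcSpace_bounds (cs : List Char) (j : Int) (h : gmcIsSpace cs j = true) :
    0 ≤ j ∧ j < (cs.length : Int) := by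
  unfold gmcIsSpace at h
  simp only [Bool.and_eq_true, decide_eq_true_eq] at h
  exact ⟨h.1.1, h.1.2⟩

lemma gmcMemOrder (cs : List Char) (j : Int) (h0 : 0 ≤ j) (h1 : j < (cs.length : Int)) :
    j ∈ gmcOrder (PySem.Int.floordiv (cs.length : Int) 2) (cs.length + 1) 0 := by
  have hmid : PySem.Int.floordiv (cs.length : Int) 2 = ((cs.length / 2 : Nat) : Int) := by
    exact_mod_cast PySem.Int.floordiv_natCast cs.length 2
  set mid := PySem.Int.floordiv (cs.length : Int) 2 with hm
  have hdd : (j - mid).natAbs < 0 + (cs.length + 1) := by omega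
  have hmem := gmcOrder_mem mid (cs.length + 1) 0 (j - mid).natAbs (Nat.zero_le _) hdd
  by_cases hle : j ≤ mid
  · have : j = mid - ((j - mid).natAbs : Int) := by omega
    rw [this]; exact hmem.1
  · have : j = mid + ((j - mid).natAbs : Int) := by omega
    rw [this]; exact hmem.2

-- ===== VERDICT (by name: the statement is the Claim_ definition above) =====
theorem get_middle_comma_spec : Claim_equal_get_middle_comma := by
  unfold Claim_equal_get_middle_comma
  intro sentence _ _
  unfold Spec_get_middle_comma get_middle_comma get_middle_comma_alt
  by_cases h0 : sentence.toList.length = 0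
  · simp [h0]
  · have h0' : (sentence.toList.length == 0) = false := by simpa using h0
    simp only [h0', Bool.false_eq_true, if_false]
    rw [gmcScan_spec]
    rw [gmcIndices_eq sentence.toList ',', gmcIndices_eq sentence.toList ' ']
    rw [gmcFoldA_eq sentence.toList (PySem.Int.floordiv (sentence.toList.length : Int) 2)]
    rw [gmcFilterComma_eq sentence.toList, gmcFilterSpace_eq sentence.toList]
    rw [gmcMin?_eq]
    set cs := sentence.toList with hcs
    set mid := PySem.Int.floordiv (cs.length : Int) 2 with hmid
    set key : Int → Nat := fun x => (x - mid).natAbs with hkey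
    set SC := (PySem.List.pyRange 0 (cs.length : Int) 1).filter (gmcIsValidComma cs) with hSC
    set SL := (PySem.List.pyRange 0 (cs.length : Int) 1).filter (gmcIsSpace cs) with hSL
    set Ord := gmcOrder mid (cs.length + 1) 0 with hOrd
    have hordQ := gmcOrder_pairwise mid (cs.length + 1) 0
    have hSCp : SC.Pairwise (· < ·) := (PySem.List.pairwise_lt_pyRange_one 0 _).filter _
    have hSLp : SL.Pairwise (· < ·) := (PySem.List.pairwise_lt_pyRange_one 0 _).filter _
    cases hA : gmcMinF key SC with
    | some a =>
      obtain ⟨haMem, haBest⟩ := gmcMinF_best key SC hSCp a hA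
      have hpa : gmcIsValidComma cs a = true := (List.mem_filter.mp haMem).2
      have hab := gmcValid_bounds cs a hpa
      have haOrd : a ∈ Ord := gmcMemOrder cs a hab.1 hab.2
      cases hB : Ord.find? (gmcIsValidComma cs) with
      | none => exact absurd hpa (List.find?_eq_none.mp hB a haOrd)
      | some b =>
        obtain ⟨hpb, hbBest⟩ := gmcFind?_best (gmcIsValidComma cs) mid Ord hordQ b hB
        have hbb := gmcValid_bounds cs b hpb
        have hbSC : b ∈ SC :=
          List.mem_filter.mpr ⟨PySem.List.mem_pyRange_one.mpr ⟨hbb.1, hbb.2⟩, hpb⟩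
        have h1 := haBest b hbSC
        have h2 := hbBest a haOrd hpa
        simp only [hA, hB]
        rcases h2 with rfl | hq
        · rfl
        · unfold gmcQ at hq
          simp only [hkey] at h1
          omega
    | none =>
      have hSCnil := (gmcMinF_eq_none key SC).mp hA
      have hnoC : ∀ i ∈ Ord, ¬ gmcIsValidComma cs i = true := by
        intro i _ hi
        have hib := gmcValid_bounds cs i hi
        have : i ∈ SC :=
          List.mem_filter.mpr ⟨PySem.List.mem_pyRange_one.mpr ⟨hib.1, hib.2⟩, hi⟩
        rw [hSCnil] at this
        simp at this
      have hBnone : Ord.find? (gmcIsValidComma cs) = none := List.find?_eq_none.mpr hnoC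
      simp only [hA, hBnone]
      cases hA2 : gmcMinF key SL with
      | some s =>
        obtain ⟨hsMem, hsBest⟩ := gmcMinF_best key SL hSLp s hA2
        have hps : gmcIsSpace cs s = true := (List.mem_filter.mp hsMem).2
        have hsb := gmcSpace_bounds cs s hps
        have hsOrd : s ∈ Ord := gmcMemOrder cs s hsb.1 hsb.2
        cases hB2 : Ord.find? (gmcIsSpace cs) with
        | none => exact absurd hps (List.find?_eq_none.mp hB2 s hsOrd)
        | some t =>
          obtain ⟨hpt, htBest⟩ := gmcFind?_best (gmcIsSpace cs) mid Ord hordQ t hB2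
          have htb := gmcSpace_bounds cs t hpt
          have htSL : t ∈ SL :=
            List.mem_filter.mpr ⟨PySem.List.mem_pyRange_one.mpr ⟨htb.1, htb.2⟩, hpt⟩
          have h1 := hsBest t htSL
          have h2 := htBest s hsOrd hps
          simp only [hA2, hB2]
          rcases h2 with rfl | hq
          · rfl
          · unfold gmcQ at hq
            simp only [hkey] at h1
            omega
      | none =>
        have hSLnil := (gmcMinF_eq_none key SL).mp hA2
        have hnoS : ∀ i ∈ Ord, ¬ gmcIsSpace cs i = true := by
          intro i _ hi
          have hib := gmcSpace_bounds cs i hi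
          have : i ∈ SL :=
            List.mem_filter.mpr ⟨PySem.List.mem_pyRange_one.mpr ⟨hib.1, hib.2⟩, hi⟩
          rw [hSLnil] at this
          simp at this
        have hB2none : Ord.find? (gmcIsSpace cs) = none := List.find?_eq_none.mpr hnoS
        simp [hA2, hB2none]
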